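-- pv_equiv track=rewrite | github.com/gbecerra1982/Neuro | src/corva_tool.py | normalize_asset_name_for_matching
-- ===== SOURCE A (Python) =====
-- def normalize_asset_name_for_matching(name: str) -> str:
--     """Normaliza nombres para matching inteligente"""
--     if not name:
--         return ""
--
--     normalized = name.lower()
--
--     # Remover prefijos YPF específicos
--     prefixes = ['ypf.nq.', 'ypf.elg.', 'ypf.', 'nq.', 'elg.']
--     for prefix in prefixes:
--         if normalized.startswith(prefix):
--             normalized = normalized[len(prefix):]
--             break
--
--     return normalized
-- ===== SOURCE B (Python) =====
-- def normalize_asset_name_for_matching(name: str) -> str: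
--     """Normaliza nombres para matching inteligente"""
--     if not name:
--         return ""
--     s = name.lower()
--     hit = max((p for p in ('ypf.nq.', 'ypf.elg.', 'ypf.', 'nq.', 'elg.') if s.startswith(p)),
--               key=len, default='')
--     return s[len(hit):]
-- ===== Notes on version B (the rewrite author's own statement) =====
-- stated objective: idiomatic
-- what changed: Replaces the ordered strip-loop with break by a single longest-match selection: collect all matching prefixes, take the longest with max(key=len), and slice it off (equivalent because the prefix list's order coincides with longest-match).
import Mathlib
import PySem

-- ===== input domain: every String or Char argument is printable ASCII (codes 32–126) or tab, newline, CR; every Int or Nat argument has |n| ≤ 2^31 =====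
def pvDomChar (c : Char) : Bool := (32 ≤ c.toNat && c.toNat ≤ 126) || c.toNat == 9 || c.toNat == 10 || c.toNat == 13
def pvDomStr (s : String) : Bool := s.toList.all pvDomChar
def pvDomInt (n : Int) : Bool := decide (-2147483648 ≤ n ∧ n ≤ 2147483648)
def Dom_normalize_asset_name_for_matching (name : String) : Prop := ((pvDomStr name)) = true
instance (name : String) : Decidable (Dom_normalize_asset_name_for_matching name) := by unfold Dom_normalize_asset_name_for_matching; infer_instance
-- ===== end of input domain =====

-- B replaces A's ordered strip-loop with a longest-matching-prefix selection (idiomatic; same cost).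

-- ===== PORT A =====
-- the for-loop over prefixes with break
def pvA_strip (normalized : String) : List String → String
  | [] => normalized
  | p :: rest =>
    if PySem.Str.startswith normalized p then
      PySem.Str.slice normalized (some (PySem.Str.len p)) none
    else pvA_strip normalized rest

def normalize_asset_name_for_matching (name : String) : String :=
  if name = "" then ""
  else
    pvA_strip (PySem.Str.lower name) ["ypf.nq.", "ypf.elg.", "ypf.", "nq.", "elg."]

-- ===== PORT B =====
def normalize_asset_name_for_matching_alt (name : String) : String :=
  if name = "" then ""
  else
    let s := PySem.Str.lower name
    -- max((p for p in … if s.startswith(p)), key=len, default='')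
    let hit := (["ypf.nq.", "ypf.elg.", "ypf.", "nq.", "elg."].filter
        (fun p => PySem.Str.startswith s p)).foldl
        (fun best p => if best.length < p.length then p else best) ""
    PySem.Str.slice s (some (PySem.Str.len hit)) none

-- ===== PRECONDITION & SPEC =====
def Spec_normalize_asset_name_for_matching (name : String) (out : String) : Prop := out = normalize_asset_name_for_matching_alt name
instance (name : String) (out : String) : Decidable (Spec_normalize_asset_name_for_matching name out) := by unfold Spec_normalize_asset_name_for_matching; infer_instance

-- ===== CLAIM (what is proved, stated in full; the proofs are below) =====
def Claim_equal_normalize_asset_name_for_matching : Prop := ∀ (name : String), Dom_normalize_asset_name_for_matching name → Spec_normalize_asset_name_for_matching name (normalize_asset_name_for_matching name)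

-- ===== LEMMAS AND PROOFS =====

-- startswith is monotone under prefix of the pattern
lemma pv_sw_mono (s p q : String) (h : q.toList <+: p.toList)
    (hp : PySem.Str.startswith s p = true) : PySem.Str.startswith s q = true := by
  simp only [PySem.Str.startswith_eq, PySem.Chars.startswith_iff] at *
  exact h.trans hp

-- two incomparable patterns cannot both be prefixes of s
lemma pv_sw_excl (s p q : String) (h : ¬ p.toList <+: q.toList) (h' : ¬ q.toList <+: p.toList)
    (hp : PySem.Str.startswith s p = true) : PySem.Str.startswith s q = false := by
  by_contra hq
  simp only [Bool.not_eq_false] at hq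
  simp only [PySem.Str.startswith_eq, PySem.Chars.startswith_iff] at hp hq
  rcases List.prefix_or_prefix_of_prefix hp hq with h1 | h1
  · exact h h1
  · exact h' h1

theorem normalize_asset_name_for_matching_spec_aux (name : String) :
    normalize_asset_name_for_matching name = normalize_asset_name_for_matching_alt name := by
  unfold normalize_asset_name_for_matching normalize_asset_name_for_matching_alt
  by_cases hn : name = ""
  · simp [hn]
  · simp only [hn, if_false]
    set s := PySem.Str.lower name with hs
    by_cases b1 : PySem.Str.startswith s "ypf.nq." = true
    · have b3 := pv_sw_mono s "ypf.nq." "ypf." (by decide) b1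
      have b2 := pv_sw_excl s "ypf.nq." "ypf.elg." (by decide) (by decide) b1
      have b4 := pv_sw_excl s "ypf.nq." "nq." (by decide) (by decide) b1
      have b5 := pv_sw_excl s "ypf.nq." "elg." (by decide) (by decide) b1
      simp only [pvA_strip, b1, b2, b3, b4, b5, List.filter, List.foldl, Bool.false_eq_true, if_true, if_false]
      congr 2
    · simp only [Bool.not_eq_true] at b1
      by_cases b2 : PySem.Str.startswith s "ypf.elg." = true
      · have b3 := pv_sw_mono s "ypf.elg." "ypf." (by decide) b2
        have b4 := pv_sw_excl s "ypf.elg." "nq." (by decide) (by decide) b2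
        have b5 := pv_sw_excl s "ypf.elg." "elg." (by decide) (by decide) b2
        simp only [pvA_strip, b1, b2, b3, b4, b5, List.filter, List.foldl, Bool.false_eq_true, if_true, if_false]
        congr 2
      · simp only [Bool.not_eq_true] at b2
        by_cases b3 : PySem.Str.startswith s "ypf." = true
        · have b4 := pv_sw_excl s "ypf." "nq." (by decide) (by decide) b3
          have b5 := pv_sw_excl s "ypf." "elg." (by decide) (by decide) b3
          simp only [pvA_strip, b1, b2, b3, b4, b5, List.filter, List.foldl, Bool.false_eq_true, if_true, if_false]
          congr 2
        · simp only [Bool.not_eq_true] at b3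
          by_cases b4 : PySem.Str.startswith s "nq." = true
          · have b5 := pv_sw_excl s "nq." "elg." (by decide) (by decide) b4
            simp only [pvA_strip, b1, b2, b3, b4, b5, List.filter, List.foldl, Bool.false_eq_true, if_true, if_false]
            congr 2
          · simp only [Bool.not_eq_true] at b4
            by_cases b5 : PySem.Str.startswith s "elg." = true
            · simp only [pvA_strip, b1, b2, b3, b4, b5, List.filter, List.foldl, Bool.false_eq_true, if_true, if_false]
              congr 2
            · simp only [Bool.not_eq_true] at b5
              simp only [pvA_strip, b1, b2, b3, b4, b5, List.filter, List.foldl,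
                Bool.false_eq_true, if_false]
              have h0 : PySem.Str.len "" = 0 := by decide
              rw [h0]
              apply String.toList_injective
              simp [PySem.Str.toList_slice,
                PySem.List.slice_from s.toList (a := 0) (by norm_num)]

-- ===== VERDICT (by name: the statement is the Claim_ definition above) =====
theorem normalize_asset_name_for_matching_spec : Claim_equal_normalize_asset_name_for_matching := by
  intro name _
  exact normalize_asset_name_for_matching_spec_aux name
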